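-- pv_equiv track=rewrite | github.com/np9603/CTCI-Python | 1. Arrays and Strings/1.6 stringCompression.py | stringComp
-- ===== SOURCE A (Python) =====
-- def stringComp(s1):
--
--     if len(s1) == 0:
--         return s1
--
--     ans = []
--     index = 0
--     counter = 1
--
--     while index < len(s1) - 1:
--         if s1[index] == s1[index+1]:
--             counter+=1
--         else:
--             ans.append(s1[index] + str(counter))
--             counter = 1
--
--         index+=1
--
--     ans.append(s1[index] + str(counter))
--     ans = "".join(ans)
--     return ans if len(ans) < len(s1) else s1
-- ===== SOURCE B (Python) =====
-- def stringComp(s1):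
--     n = len(s1)
--     starts = [i for i in range(n) if i == 0 or s1[i] != s1[i - 1]]
--     comp = "".join(s1[a] + str(b - a) for a, b in zip(starts, starts[1:] + [n]))
--     return comp if len(comp) < n else s1
-- ===== Notes on version B (the rewrite author's own statement) =====
-- stated objective: alternative
-- what changed: Replaces A's stateful counter loop (adjacent compare, counter carried across iterations, final flush) by a staged index pipeline: collect all run-start indices with one range comprehension, pair consecutive starts via zip, and derive each run length by index subtraction instead of counting.
import Mathlib
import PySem

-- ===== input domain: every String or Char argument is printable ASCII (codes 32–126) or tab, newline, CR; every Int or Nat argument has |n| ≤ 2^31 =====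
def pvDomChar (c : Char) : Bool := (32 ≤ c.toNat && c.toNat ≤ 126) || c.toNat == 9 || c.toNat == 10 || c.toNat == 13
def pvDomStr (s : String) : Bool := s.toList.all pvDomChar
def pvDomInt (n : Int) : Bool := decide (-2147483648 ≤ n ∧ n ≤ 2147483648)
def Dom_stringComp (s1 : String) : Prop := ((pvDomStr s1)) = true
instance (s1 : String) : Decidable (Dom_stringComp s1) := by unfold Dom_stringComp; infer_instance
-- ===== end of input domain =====

-- B replaces A's counter/flush state machine by a staged pipeline: collect all run-start
-- indices, zip consecutive starts, and obtain each run length by index subtraction.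

-- ===== PORT A =====
-- A's while loop over index: at each step it compares the current char with the next one,
-- carrying (counter, ans); after the loop it appends the final run.  Walking the tail of
-- the char list with the current char as state is that loop, step for step.
def stringCompLoopA : List Char → Char → Int → List String → List String
  | [], prev, counter, ans => ans ++ [String.mk (prev :: PySem.Int.toChars counter)]
  | next :: rest, prev, counter, ans =>
    if prev == next then stringCompLoopA rest next (counter + 1) ans
    else stringCompLoopA rest next 1 (ans ++ [String.mk (prev :: PySem.Int.toChars counter)])

def stringComp (s1 : String) : String :=
  match s1.toList with
  | [] => s1                                  -- if len(s1) == 0: return s1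
  | c :: rest =>
    let ans := PySem.Str.join "" (stringCompLoopA rest c 1 [])
    if PySem.Str.len ans < PySem.Str.len s1 then ans else s1

-- ===== PORT B =====
-- Source B's comprehension '[i for i in range(n) if i == 0 or s1[i] != s1[i-1]]';
-- all indices are in range (0 ≤ i < n, and i-1 is only read when i ≠ 0), so getD is exact.
def pvStartPB (l : List Char) (i : Nat) : Bool := i == 0 || !(l.getD i ' ' == l.getD (i - 1) ' ')
def pvStartsB (l : List Char) : List Nat := (List.range l.length).filter (pvStartPB l)
-- one element of the join: s1[a] + str(b - a)
def pvPartB (l : List Char) (p : Nat × Nat) : String :=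
  String.mk (l.getD p.1 ' ' :: PySem.Int.toChars ((p.2 : Int) - (p.1 : Int)))

def stringComp_alt (s1 : String) : String :=
  let l := s1.toList
  let starts := pvStartsB l
  let comp := PySem.Str.join "" ((starts.zip (starts.drop 1 ++ [l.length])).map (pvPartB l))
  if PySem.Str.len comp < PySem.Str.len s1 then comp else s1

-- ===== PRECONDITION & SPEC =====
def Spec_stringComp (s1 : String) (out : String) : Prop := out = stringComp_alt s1
instance (s1 : String) (out : String) : Decidable (Spec_stringComp s1 out) := by unfold Spec_stringComp; infer_instance

-- ===== CLAIM (what is proved, stated in full; the proofs are below) =====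
def Claim_equal_stringComp : Prop := ∀ (s1 : String), Dom_stringComp s1 → Spec_stringComp s1 (stringComp s1)

-- ===== LEMMAS AND PROOFS =====

-- Canonical run decomposition used only as the middle term of the proof:
-- run-jumping parts (one String per maximal run of equal adjacent chars).
def stringCompRun (c : Char) : List Char → Int × List Char
  | [] => (1, [])
  | d :: rest => if d == c then ((stringCompRun c rest).1 + 1, (stringCompRun c rest).2)
                 else (1, d :: rest)

theorem stringCompRun_snd_length (c : Char) : ∀ l : List Char, (stringCompRun c l).2.length ≤ l.length
  | [] => by simp [stringCompRun]
  | d :: rest => by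
      by_cases h : d == c <;> simp [stringCompRun, h]
      exact Nat.le_succ_of_le (stringCompRun_snd_length c rest)

def stringCompParts : List Char → List String
  | [] => []
  | c :: rest =>
    String.mk (c :: PySem.Int.toChars (stringCompRun c rest).1)
      :: stringCompParts (stringCompRun c rest).2
termination_by l => l.length
decreasing_by exact Nat.lt_succ_of_le (stringCompRun_snd_length c rest)

-- A's loop, started with counter n on current char c, emits the canonical parts.
theorem stringCompLoopA_eq : ∀ (l : List Char) (c : Char) (n : Int) (ans : List String),
    stringCompLoopA l c n ans =
      ans ++ (String.mk (c :: PySem.Int.toChars (n - 1 + (stringCompRun c l).1))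
        :: stringCompParts (stringCompRun c l).2)
  | [], c, n, ans => by
      simp [stringCompLoopA, stringCompRun, stringCompParts]
  | d :: rest, c, n, ans => by
      by_cases h : c = d
      · subst h
        rw [stringCompLoopA, if_pos (by simp), stringCompLoopA_eq rest c (n + 1) ans]
        simp [stringCompRun]
      · have h' : ¬ d = c := fun e => h e.symm
        rw [stringCompLoopA, if_neg (by simp [h]),
          stringCompLoopA_eq rest d 1 (ans ++ [String.mk (c :: PySem.Int.toChars n)])]
        simp [stringCompRun, h', stringCompParts]

-- run structure: stringCompRun c t splits t as replicate m c ++ rest, rest not starting with c.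
theorem stringCompRun_spec (c : Char) : ∀ t : List Char,
    ∃ m : Nat, (stringCompRun c t).1 = (m : Int) + 1 ∧
      t = List.replicate m c ++ (stringCompRun c t).2 ∧
      (∀ d, (stringCompRun c t).2.head? = some d → d ≠ c)
  | [] => ⟨0, by simp [stringCompRun]⟩
  | d :: rest => by
      by_cases h : d = c
      · obtain ⟨m, h1, h2, h3⟩ := stringCompRun_spec c rest
        refine ⟨m + 1, ?_, ?_, ?_⟩
        · simp only [stringCompRun, h, beq_self_eq_true, if_true, h1]
          push_cast; ring
        · simp only [stringCompRun, h, beq_self_eq_true, if_true, List.replicate_succ,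
            List.cons_append]
          rw [← h] at h2 ⊢
          exact congrArg (d :: ·) h2
        · simpa [stringCompRun, h] using h3
      · refine ⟨0, by simp [stringCompRun, h], by simp [stringCompRun, h], ?_⟩
        simp only [stringCompRun, h]
        simp [h]

-- parts-of-starts, abbreviation for B's pipeline on a char list
def pvPartsB (l : List Char) : List String :=
  ((pvStartsB l).zip ((pvStartsB l).drop 1 ++ [l.length])).map (pvPartB l)

theorem range_filter_eq_zero (k : Nat) (hk : 1 ≤ k) (P : Nat → Bool)
    (h0 : P 0 = true) (h : ∀ i, 1 ≤ i → i < k → P i = false) :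
    (List.range k).filter P = [0] := by
  obtain ⟨k', rfl⟩ : ∃ k', k = k' + 1 := ⟨k - 1, by omega⟩
  rw [List.range_succ_eq_map, List.filter_cons, List.filter_map]
  have : (List.range k').filter (P ∘ Nat.succ) = [] := by
    rw [List.filter_eq_nil_iff]
    intro i hi
    simp only [Function.comp, Bool.not_eq_true]
    exact h (i + 1) (by omega) (by simpa using List.mem_range.mp hi)
  simp [h0, this]

-- the key structural lemma: starts of (replicate k c ++ rest)
theorem startsB_replicate (c : Char) (k : Nat) (hk : 1 ≤ k) (rest : List Char)
    (hr : ∀ d, rest.head? = some d → d ≠ c) :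
    pvStartsB (List.replicate k c ++ rest) = 0 :: (pvStartsB rest).map (· + k) := by
  set L := List.replicate k c ++ rest with hL
  have hlen : L.length = k + rest.length := by simp [hL]
  have hgetRep : ∀ i, i < k → L.getD i ' ' = c := by
    intro i hi
    rw [hL, List.getD_append _ _ _ _ (by simpa using hi)]
    simp [List.getD_eq_getElem?_getD, hi]
  have hgetRest : ∀ j : Nat, L.getD (j + k) ' ' = rest.getD j ' ' := by
    intro j
    rw [hL, List.getD_append_right _ _ _ _ (by simp)]
    simp
  unfold pvStartsB
  rw [hlen, List.range_add, List.filter_append, List.filter_map]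
  have h1 : (List.range k).filter (pvStartPB L) = [0] := by
    apply range_filter_eq_zero k hk
    · simp [pvStartPB]
    · intro i h1i hik
      have e1 : L.getD i ' ' = c := hgetRep i hik
      have e2 : L.getD (i - 1) ' ' = c := hgetRep (i - 1) (by omega)
      simp only [pvStartPB, e1, e2]
      simp
      omega
  have h2 : ∀ j : Nat, j < rest.length → (pvStartPB L ∘ (k + ·)) j = pvStartPB rest j := by
    intro j hj
    simp only [Function.comp]
    rcases Nat.eq_zero_or_pos j with rfl | hj1
    · obtain ⟨d, t, rfl⟩ : ∃ d t, rest = d :: t := by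
        cases rest with
        | nil => simp at hj
        | cons d t => exact ⟨d, t, rfl⟩
      have hd : d ≠ c := hr d rfl
      have e1 : L.getD (k + 0) ' ' = d := by rw [Nat.add_comm, hgetRest]; rfl
      have e2 : L.getD (k + 0 - 1) ' ' = c := hgetRep (k - 1) (by omega)
      have hk0 : (k + 0 == 0) = false := by simp; omega
      simp only [pvStartPB, e1, e2, hk0]
      simp [hd]
    · have e1 : L.getD (k + j) ' ' = rest.getD j ' ' := by rw [Nat.add_comm]; exact hgetRest j
      have e2 : L.getD (k + j - 1) ' ' = rest.getD (j - 1) ' ' := by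
        have : k + j - 1 = (j - 1) + k := by omega
        rw [this, hgetRest]
      have a1 : (k + j == 0) = false := by simp; omega
      have a2 : (j == 0) = false := by simp; omega
      simp only [pvStartPB, e1, e2, a1, a2]
  rw [h1, List.filter_congr (by intro j hj; exact h2 j (List.mem_range.mp hj))]
  have : (fun x => k + x) = (fun x => x + k) := by funext x; omega
  simp [this]

theorem startsB_head (d : Char) (t : List Char) :
    ∃ T, pvStartsB (d :: t) = 0 :: T := by
  unfold pvStartsB
  have : (d :: t).length = (d :: t).length - 1 + 1 := by simp
  rw [this, List.range_succ_eq_map, List.filter_cons]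
  simp [pvStartPB]

theorem pvPartB_shift (c : Char) (k : Nat) (rest : List Char) (p : Nat × Nat) :
    pvPartB (List.replicate k c ++ rest) (p.1 + k, p.2 + k) = pvPartB rest p := by
  have e : (List.replicate k c ++ rest).getD (p.1 + k) ' ' = rest.getD p.1 ' ' := by
    rw [List.getD_append_right _ _ _ _ (by simp)]; simp
  have e2 : ((p.2 + k : Nat) : Int) - ((p.1 + k : Nat) : Int)
      = ((p.2 : Nat) : Int) - ((p.1 : Nat) : Int) := by push_cast; ring
  show String.mk ((List.replicate k c ++ rest).getD (p.1 + k) ' '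
      :: PySem.Int.toChars (((p.2 + k : Nat) : Int) - ((p.1 + k : Nat) : Int)))
    = String.mk (rest.getD p.1 ' ' :: PySem.Int.toChars (((p.2 : Nat) : Int) - ((p.1 : Nat) : Int)))
  rw [e, e2]

theorem pvPartsB_eq_parts : ∀ n : Nat, ∀ l : List Char, l.length ≤ n →
    pvPartsB l = stringCompParts l
  | 0, l, h => by
      have : l = [] := List.eq_nil_of_length_eq_zero (by omega)
      subst this
      simp [pvPartsB, pvStartsB, stringCompParts]
  | Nat.succ n, l, h => by
      cases l with
      | nil => simp [pvPartsB, pvStartsB, stringCompParts]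
      | cons c t =>
        obtain ⟨m, hm1, hm2, hm3⟩ := stringCompRun_spec c t
        set rest := (stringCompRun c t).2 with hrest
        have hlrep : c :: t = List.replicate (m + 1) c ++ rest := by
          rw [List.replicate_succ, List.cons_append, ← hm2]
        have hrlen : rest.length ≤ n := by
          have := congrArg List.length hlrep
          simp at this
          simp at h
          omega
        have hstarts := startsB_replicate c (m + 1) (by omega) rest hm3
        have ih := pvPartsB_eq_parts n rest hrlen
        rw [stringCompParts]
        rw [← hrest, hm1]
        clear_value rest
        unfold pvPartsB
        rw [hlrep, hstarts]
        have hllen : (List.replicate (m + 1) c ++ rest).length = rest.length + (m + 1) := by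
          simp; omega
        have e0 : (List.replicate (m + 1) c ++ rest).getD 0 ' ' = c := by
          rw [List.getD_append _ _ _ _ (by simp)]
          simp [List.getD_eq_getElem?_getD]
        cases hre : rest with
        | nil =>
          subst hre
          rw [hllen]
          have e4 : ((0 + (m + 1) : Nat) : Int) - ((0 : Nat) : Int) = (m : Int) + 1 := by
            push_cast; ring
          simp [pvStartsB, stringCompParts, pvPartB]
        | cons d t' =>
          obtain ⟨T, hT⟩ := startsB_head d t'
          rw [← hre] at hT
          rw [← hre]
          rw [hT, hllen]
          have hY : [rest.length + (m + 1)] = List.map (fun x => x + (m + 1)) [rest.length] := by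
            simp
          rw [List.drop_succ_cons, List.drop_zero, hY, ← List.map_append, List.cons_append]
          simp only [List.map_cons, List.zip_cons_cons]
          have hback : (0 + (m + 1)) :: List.map (fun x => x + (m + 1)) T
              = List.map (fun x => x + (m + 1)) (0 :: T) := rfl
          rw [hback, List.zip_map, List.map_map]
          congr 1
          · have e4 : ((0 + (m + 1) : Nat) : Int) - ((0 : Nat) : Int) = (m : Int) + 1 := by
              push_cast; ring
            show String.mk ((List.replicate (m + 1) c ++ rest).getD 0 ' '
                :: PySem.Int.toChars (((0 + (m + 1) : Nat) : Int) - ((0 : Nat) : Int)))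
              = String.mk (c :: PySem.Int.toChars ((m : Int) + 1))
            rw [e0, e4]
          · rw [← ih]
            unfold pvPartsB
            rw [hT]
            simp only [List.drop_succ_cons, List.drop_zero]
            exact List.map_congr_left (fun p _ => pvPartB_shift c (m + 1) rest p)

theorem stringComp_eq_alt (s1 : String) : stringComp s1 = stringComp_alt s1 := by
  unfold stringComp stringComp_alt
  cases hl : s1.toList with
  | nil =>
      simp [pvStartsB, hl, PySem.Str.join]
  | cons c rest =>
      dsimp only
      rw [stringCompLoopA_eq rest c 1 []]
      have := pvPartsB_eq_parts (c :: rest).length (c :: rest) le_rfl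
      unfold pvPartsB at this
      rw [this]
      simp [stringCompParts]

-- ===== VERDICT (by name: the statement is the Claim_ definition above) =====
theorem stringComp_spec : Claim_equal_stringComp := by
  intro s1 _
  unfold Spec_stringComp
  exact stringComp_eq_alt s1
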